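-- pv_equiv track=rewrite | github.com/krityamsingh/Verse-waife | SoulCatcher/modules/status.py | _wealth
-- ===== SOURCE A (Python) =====
-- def _wealth(n: int) -> str:
--     for thr, lbl in reversed([
--         (0,"Lost Soul"),(1_000,"Traveler"),(5_000,"Merchant"),
--         (20_000,"Guild Master"),(50_000,"Lord"),(150_000,"Duke"),
--         (500_000,"Prince"),(1_000_000,"King"),(5_000_000,"Emperor"),(10_000_000,"Soul Lord"),
--     ]):
--         if n >= thr: return lbl
--     return "Lost Soul"
-- ===== SOURCE B (Python) =====
-- _THRESHOLDS = [0, 1_000, 5_000, 20_000, 50_000, 150_000,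
--                500_000, 1_000_000, 5_000_000, 10_000_000]
-- _LABELS = ["Lost Soul", "Traveler", "Merchant", "Guild Master", "Lord",
--            "Duke", "Prince", "King", "Emperor", "Soul Lord"]
--
-- def _wealth(n: int) -> str:
--     if n < 0:
--         return "Lost Soul"
--     # binary search for the rightmost threshold <= n (bisect_right - 1)
--     lo, hi = 0, len(_THRESHOLDS)
--     while lo < hi:
--         mid = (lo + hi) // 2
--         if n < _THRESHOLDS[mid]:
--             hi = mid
--         else:
--             lo = mid + 1
--     return _LABELS[lo - 1]
-- ===== Notes on version B (the rewrite author's own statement) =====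
-- stated objective: alternative
-- what changed: Replaced the reverse linear scan over (threshold,label) pairs by a hand-rolled binary search (bisect_right) over a precomputed ascending threshold list with a parallel label list, guarding negative amounts before the lookup.
import Mathlib
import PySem

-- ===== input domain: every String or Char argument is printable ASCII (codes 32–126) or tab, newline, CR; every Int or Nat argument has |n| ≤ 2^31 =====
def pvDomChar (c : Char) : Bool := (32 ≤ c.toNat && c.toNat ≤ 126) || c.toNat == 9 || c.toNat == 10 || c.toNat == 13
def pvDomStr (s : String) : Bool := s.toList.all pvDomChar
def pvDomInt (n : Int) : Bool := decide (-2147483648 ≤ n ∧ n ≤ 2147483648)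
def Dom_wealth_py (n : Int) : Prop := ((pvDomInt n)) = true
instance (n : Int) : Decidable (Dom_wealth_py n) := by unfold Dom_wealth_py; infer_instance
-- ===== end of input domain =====

-- B replaces A's reverse linear scan over (threshold,label) pairs by a binary search
-- (bisect_right) on a precomputed ascending threshold list with a parallel label list
-- (objective: alternative/idiomatic lookup structure).

-- ===== PORT A =====
-- the for-loop with early return over the reversed pair list
def wealthGoA (n : Int) : List (Int × String) → String
  | [] => "Lost Soul"
  | (thr, lbl) :: rest => if n ≥ thr then lbl else wealthGoA n rest

def wealth_py (n : Int) : String :=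
  wealthGoA n ([(0,"Lost Soul"),(1000,"Traveler"),(5000,"Merchant"),
    (20000,"Guild Master"),(50000,"Lord"),(150000,"Duke"),
    (500000,"Prince"),(1000000,"King"),(5000000,"Emperor"),(10000000,"Soul Lord")].reverse)

-- ===== PORT B =====
def wealthThresholds : List Int :=
  [0, 1000, 5000, 20000, 50000, 150000, 500000, 1000000, 5000000, 10000000]
def wealthLabels : List String :=
  ["Lost Soul", "Traveler", "Merchant", "Guild Master", "Lord",
   "Duke", "Prince", "King", "Emperor", "Soul Lord"]

-- Source B's while-loop binary search (bisect_right)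
def wealthBisect (n : Int) (lo hi : Nat) : Nat :=
  if h : lo < hi then
    let mid := (lo + hi) / 2
    if n < wealthThresholds.getD mid 0 then wealthBisect n lo mid
    else wealthBisect n (mid + 1) hi
  else lo
termination_by hi - lo
decreasing_by all_goals omega

def wealth_py_alt (n : Int) : String :=
  if n < 0 then "Lost Soul"
  else wealthLabels.getD (wealthBisect n 0 wealthThresholds.length - 1) ""

-- ===== PRECONDITION & SPEC =====
def Spec_wealth_py (n : Int) (out : String) : Prop := out = wealth_py_alt n
instance (n : Int) (out : String) : Decidable (Spec_wealth_py n out) := by unfold Spec_wealth_py; infer_instance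

-- ===== CLAIM (what is proved, stated in full; the proofs are below) =====
def Claim_equal_wealth_py : Prop := ∀ (n : Int), Dom_wealth_py n → Spec_wealth_py n (wealth_py n)

-- ===== LEMMAS AND PROOFS =====

-- ===== VERDICT (by name: the statement is the Claim_ definition above) =====
set_option maxHeartbeats 1000000 in
theorem wealth_py_spec : Claim_equal_wealth_py := by
  intro n _
  unfold Spec_wealth_py wealth_py wealth_py_alt
  have hlen : wealthThresholds.length = 10 := by norm_num [wealthThresholds]
  rw [hlen]
  by_cases c0 : n < 0
  · rw [if_pos (by omega)]
    norm_num [wealthGoA]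
    split_ifs <;> first | rfl | omega
  by_cases c1 : n < 1000
  · have hb : wealthBisect n 0 10 = 1 := by
      rw [wealthBisect]; norm_num [wealthThresholds]; rw [if_pos (by omega)]
      rw [wealthBisect]; norm_num [wealthThresholds]; rw [if_pos (by omega)]
      rw [wealthBisect]; norm_num [wealthThresholds]; rw [if_pos (by omega)]
      rw [wealthBisect]; norm_num [wealthThresholds]; rw [if_neg (by omega)]
      rw [wealthBisect]; norm_num
    rw [if_neg (by omega), hb]
    norm_num [wealthLabels, wealthGoA]
    split_ifs <;> first | rfl | omega
  by_cases c2 : n < 5000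
  · have hb : wealthBisect n 0 10 = 2 := by
      rw [wealthBisect]; norm_num [wealthThresholds]; rw [if_pos (by omega)]
      rw [wealthBisect]; norm_num [wealthThresholds]; rw [if_pos (by omega)]
      rw [wealthBisect]; norm_num [wealthThresholds]; rw [if_neg (by omega)]
      rw [wealthBisect]; norm_num
    rw [if_neg (by omega), hb]
    norm_num [wealthLabels, wealthGoA]
    split_ifs <;> first | rfl | omega
  by_cases c3 : n < 20000
  · have hb : wealthBisect n 0 10 = 3 := by
      rw [wealthBisect]; norm_num [wealthThresholds]; rw [if_pos (by omega)]
      rw [wealthBisect]; norm_num [wealthThresholds]; rw [if_neg (by omega)]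
      rw [wealthBisect]; norm_num [wealthThresholds]; rw [if_pos (by omega)]
      rw [wealthBisect]; norm_num [wealthThresholds]; rw [if_pos (by omega)]
      rw [wealthBisect]; norm_num
    rw [if_neg (by omega), hb]
    norm_num [wealthLabels, wealthGoA]
    split_ifs <;> first | rfl | omega
  by_cases c4 : n < 50000
  · have hb : wealthBisect n 0 10 = 4 := by
      rw [wealthBisect]; norm_num [wealthThresholds]; rw [if_pos (by omega)]
      rw [wealthBisect]; norm_num [wealthThresholds]; rw [if_neg (by omega)]
      rw [wealthBisect]; norm_num [wealthThresholds]; rw [if_pos (by omega)]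
      rw [wealthBisect]; norm_num [wealthThresholds]; rw [if_neg (by omega)]
      rw [wealthBisect]; norm_num
    rw [if_neg (by omega), hb]
    norm_num [wealthLabels, wealthGoA]
    split_ifs <;> first | rfl | omega
  by_cases c5 : n < 150000
  · have hb : wealthBisect n 0 10 = 5 := by
      rw [wealthBisect]; norm_num [wealthThresholds]; rw [if_pos (by omega)]
      rw [wealthBisect]; norm_num [wealthThresholds]; rw [if_neg (by omega)]
      rw [wealthBisect]; norm_num [wealthThresholds]; rw [if_neg (by omega)]
      rw [wealthBisect]; norm_num
    rw [if_neg (by omega), hb]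
    norm_num [wealthLabels, wealthGoA]
    split_ifs <;> first | rfl | omega
  by_cases c6 : n < 500000
  · have hb : wealthBisect n 0 10 = 6 := by
      rw [wealthBisect]; norm_num [wealthThresholds]; rw [if_neg (by omega)]
      rw [wealthBisect]; norm_num [wealthThresholds]; rw [if_pos (by omega)]
      rw [wealthBisect]; norm_num [wealthThresholds]; rw [if_pos (by omega)]
      rw [wealthBisect]; norm_num [wealthThresholds]; rw [if_pos (by omega)]
      rw [wealthBisect]; norm_num
    rw [if_neg (by omega), hb]
    norm_num [wealthLabels, wealthGoA]
    split_ifs <;> first | rfl | omega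
  by_cases c7 : n < 1000000
  · have hb : wealthBisect n 0 10 = 7 := by
      rw [wealthBisect]; norm_num [wealthThresholds]; rw [if_neg (by omega)]
      rw [wealthBisect]; norm_num [wealthThresholds]; rw [if_pos (by omega)]
      rw [wealthBisect]; norm_num [wealthThresholds]; rw [if_pos (by omega)]
      rw [wealthBisect]; norm_num [wealthThresholds]; rw [if_neg (by omega)]
      rw [wealthBisect]; norm_num
    rw [if_neg (by omega), hb]
    norm_num [wealthLabels, wealthGoA]
    split_ifs <;> first | rfl | omega
  by_cases c8 : n < 5000000
  · have hb : wealthBisect n 0 10 = 8 := by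
      rw [wealthBisect]; norm_num [wealthThresholds]; rw [if_neg (by omega)]
      rw [wealthBisect]; norm_num [wealthThresholds]; rw [if_pos (by omega)]
      rw [wealthBisect]; norm_num [wealthThresholds]; rw [if_neg (by omega)]
      rw [wealthBisect]; norm_num
    rw [if_neg (by omega), hb]
    norm_num [wealthLabels, wealthGoA]
    split_ifs <;> first | rfl | omega
  by_cases c9 : n < 10000000
  · have hb : wealthBisect n 0 10 = 9 := by
      rw [wealthBisect]; norm_num [wealthThresholds]; rw [if_neg (by omega)]
      rw [wealthBisect]; norm_num [wealthThresholds]; rw [if_neg (by omega)]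
      rw [wealthBisect]; norm_num [wealthThresholds]; rw [if_pos (by omega)]
      rw [wealthBisect]; norm_num
    rw [if_neg (by omega), hb]
    norm_num [wealthLabels, wealthGoA]
    split_ifs <;> first | rfl | omega
  · have hb : wealthBisect n 0 10 = 10 := by
      rw [wealthBisect]; norm_num [wealthThresholds]; rw [if_neg (by omega)]
      rw [wealthBisect]; norm_num [wealthThresholds]; rw [if_neg (by omega)]
      rw [wealthBisect]; norm_num [wealthThresholds]; rw [if_neg (by omega)]
      rw [wealthBisect]; norm_num
    rw [if_neg (by omega), hb]
    norm_num [wealthLabels, wealthGoA]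
    split_ifs <;> first | rfl | omega
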